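-- pv_equiv track=rewrite | github.com/patham9/NarsGPT | Stamp.py | Stamp_make
-- ===== SOURCE A (Python) =====
-- def Stamp_make(stamp1, stamp2, stamp_size_max = 10):
--     ret = []
--     processStamp1, processStamp2 = (True, True)
--     j,i = (0,0)
--     while i<stamp_size_max:
--         if processStamp1:
--             if i < len(stamp1):
--                 ret.append(stamp1[i])
--                 if len(ret) >= stamp_size_max:
--                     break;
--             else:
--                 processStamp1 = False
--         if processStamp2:
--             if i < len(stamp2):
--                 ret.append(stamp2[i])
--                 if len(ret) >= stamp_size_max:
--                     break
--         if not processStamp1 and not processStamp2: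
--             break
--         i += 1
--     return ret
-- ===== SOURCE B (Python) =====
-- def Stamp_make(stamp1, stamp2, stamp_size_max = 10):
--     k = min(len(stamp1), len(stamp2))
--     full = [x for pair in zip(stamp1, stamp2) for x in pair]
--     full += stamp1[k:]
--     full += stamp2[k:]
--     return full[:max(0, stamp_size_max)]
-- ===== Notes on version B (the rewrite author's own statement) =====
-- stated objective: simpler
-- what changed: Replaces A's stateful while-loop (shared index, processStamp flags, inline length-cap breaks) with a non-capped zip-flatten of the common prefix plus the two leftover tails, truncated afterwards by a single slice full[:max(0, stamp_size_max)].
import Mathlib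
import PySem

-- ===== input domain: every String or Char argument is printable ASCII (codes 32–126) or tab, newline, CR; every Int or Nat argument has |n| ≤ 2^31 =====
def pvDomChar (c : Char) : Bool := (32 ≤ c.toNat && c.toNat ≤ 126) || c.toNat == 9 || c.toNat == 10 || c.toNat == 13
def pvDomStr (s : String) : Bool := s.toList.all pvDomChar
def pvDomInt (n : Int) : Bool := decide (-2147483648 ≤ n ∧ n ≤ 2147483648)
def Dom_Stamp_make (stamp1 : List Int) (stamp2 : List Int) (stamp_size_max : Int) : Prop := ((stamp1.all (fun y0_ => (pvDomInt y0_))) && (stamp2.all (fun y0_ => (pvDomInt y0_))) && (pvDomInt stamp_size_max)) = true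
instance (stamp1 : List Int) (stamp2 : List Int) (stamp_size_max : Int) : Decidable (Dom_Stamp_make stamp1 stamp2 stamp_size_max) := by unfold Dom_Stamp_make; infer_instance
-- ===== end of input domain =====

-- B replaces A's flagged while-loop that interleaves-and-caps inline by a full zip-flatten
-- plus leftover tails, truncated afterwards by one slice (objective: simpler).

-- ===== PORT A =====
-- the while-loop of A: state (ret, processStamp1, processStamp2, i); processStamp2 is never
-- set to False in A, but the variable is kept for faithfulness.
def Stamp_make_loop (stamp1 : List Int) (stamp2 : List Int) (stamp_size_max : Int)
    (ret : List Int) (p1 p2 : Bool) (i : Int) : List Int :=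
  if _h : i < stamp_size_max then
    -- "if processStamp1: …"  (returns new ret, new p1, and whether the first break fired)
    let st1 : (List Int × Bool) × Bool :=
      if p1 then
        if i < (stamp1.length : Int) then
          let ret1 := ret ++ [stamp1.getD i.toNat 0]    -- stamp1[i], i known in range
          ((ret1, p1), decide (stamp_size_max ≤ (ret1.length : Int)))
        else ((ret, false), false)
      else ((ret, p1), false)
    let ret := st1.1.1
    let p1 := st1.1.2
    if st1.2 then ret
    else
      -- "if processStamp2: …"
      let st2 : List Int × Bool :=
        if p2 then
          if i < (stamp2.length : Int) then
            let ret2 := ret ++ [stamp2.getD i.toNat 0]  -- stamp2[i], i known in range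
            (ret2, decide (stamp_size_max ≤ (ret2.length : Int)))
          else (ret, false)
        else (ret, false)
      let ret := st2.1
      if st2.2 then ret
      else if !p1 && !p2 then ret
      else Stamp_make_loop stamp1 stamp2 stamp_size_max ret p1 p2 (i + 1)
  else ret
termination_by (stamp_size_max - i).toNat
decreasing_by omega

def Stamp_make (stamp1 : List Int) (stamp2 : List Int) (stamp_size_max : Int) : List Int :=
  Stamp_make_loop stamp1 stamp2 stamp_size_max [] true true 0

-- ===== PORT B =====
def Stamp_make_alt (stamp1 : List Int) (stamp2 : List Int) (stamp_size_max : Int) : List Int :=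
  let k := min stamp1.length stamp2.length
  let full := ((stamp1.zip stamp2).flatMap fun p => [p.1, p.2])
                ++ stamp1.drop k ++ stamp2.drop k
  full.take (max 0 stamp_size_max).toNat

-- ===== PRECONDITION & SPEC =====
def Spec_Stamp_make (stamp1 : List Int) (stamp2 : List Int) (stamp_size_max : Int) (out : List Int) : Prop := out = Stamp_make_alt stamp1 stamp2 stamp_size_max
instance (stamp1 : List Int) (stamp2 : List Int) (stamp_size_max : Int) (out : List Int) : Decidable (Spec_Stamp_make stamp1 stamp2 stamp_size_max out) := by unfold Spec_Stamp_make; infer_instance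

-- ===== CLAIM (what is proved, stated in full; the proofs are below) =====
def Claim_equal_Stamp_make : Prop := ∀ (stamp1 : List Int) (stamp2 : List Int) (stamp_size_max : Int), Dom_Stamp_make stamp1 stamp2 stamp_size_max → Spec_Stamp_make stamp1 stamp2 stamp_size_max (Stamp_make stamp1 stamp2 stamp_size_max)

-- ===== LEMMAS AND PROOFS =====

-- mathematical interleaving, the common value both ports compute (capped/uncapped)
def ilv : List Int → List Int → List Int
  | [], ys => ys
  | x :: xs, [] => x :: xs
  | x :: xs, y :: ys => x :: y :: ilv xs ys

theorem alt_full_eq_ilv (s1 s2 : List Int) :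
    ((s1.zip s2).flatMap fun p => [p.1, p.2])
      ++ s1.drop (min s1.length s2.length) ++ s2.drop (min s1.length s2.length)
      = ilv s1 s2 := by
  induction s1 generalizing s2 with
  | nil => cases s2 <;> simp [ilv]
  | cons x xs ih =>
    cases s2 with
    | nil => simp [ilv]
    | cons y ys => simp [ilv, ← ih ys]

theorem ilv_drop_succ (s1 s2 : List Int) (n : Nat) (h1 : s1.length ≤ n) :
    ilv (s1.drop n) (s2.drop n) = s2.drop n := by
  rw [List.drop_eq_nil_of_le h1]; cases s2.drop n <;> rfl

theorem loop_eq (s1 s2 : List Int) (m : Int) :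
    ∀ fuel (n : Nat) (ret : List Int) (p1 : Bool),
      (m - (n : Int)).toNat ≤ fuel →
      ret.length = min n s1.length + min n s2.length →
      (ret.length : Int) < m →
      (p1 = false → s1.length ≤ n) →
      Stamp_make_loop s1 s2 m ret p1 true (n : Int)
        = ret ++ (ilv (s1.drop n) (s2.drop n)).take (m - (ret.length : Int)).toNat := by
  intro fuel
  induction fuel with
  | zero =>
    intro n ret p1 hf hlen hlt hp1
    have hmn : ¬ ((n : Int) < m) := by omega
    rw [Stamp_make_loop, dif_neg hmn]
    have hn1 : s1.length ≤ n := by omega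
    have hn2 : s2.length ≤ n := by omega
    rw [ilv_drop_succ s1 s2 n hn1, List.drop_eq_nil_of_le hn2]
    simp
  | succ fuel ih =>
    intro n ret p1 hf hlen hlt hp1
    rw [Stamp_make_loop]
    split
    · rename_i hi
      by_cases h1 : (n : Int) < (s1.length : Int)
      · -- stamp1 contributes: p1 must be true (else length ≤ n contradicts h1)
        have hp : p1 = true := by
          cases p1
          · exfalso; have := hp1 rfl; omega
          · rfl
        subst hp
        simp only [reduceIte, if_pos h1]
        have hd1 : s1.drop n = s1.getD n 0 :: s1.drop (n + 1) := by
          have hn : n < s1.length := by omega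
          rw [List.getD_eq_getElem _ _ hn, List.drop_eq_getElem_cons hn]
        have hcast : ((n : Int)).toNat = n := by omega
        rw [hcast]
        by_cases hb1 : m ≤ ((ret.length + 1 : Nat) : Int)
        · -- first break fires
          simp only [List.length_append, List.length_cons, List.length_nil]
          rw [decide_eq_true (by simpa using hb1)]
          simp only [reduceIte]
          have hm : (m - (ret.length : Int)).toNat = 1 := by omega
          rw [hm, hd1]
          cases s2.drop n <;> simp [ilv]
        · simp only [List.length_append, List.length_cons, List.length_nil]
          rw [decide_eq_false (by simpa using hb1)]
          simp only [Bool.false_eq_true, if_false]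
          by_cases h2 : (n : Int) < (s2.length : Int)
          · -- stamp2 also contributes
            simp only [if_pos h2]
            have hd2 : s2.drop n = s2.getD n 0 :: s2.drop (n + 1) := by
              have hn : n < s2.length := by omega
              rw [List.getD_eq_getElem _ _ hn, List.drop_eq_getElem_cons hn]
            by_cases hb2 : m ≤ ((ret.length + 2 : Nat) : Int)
            · try simp only [List.length_append, List.length_cons, List.length_nil]
              rw [decide_eq_true (by simpa using hb2)]
              simp only [reduceIte]
              have hm : (m - (ret.length : Int)).toNat = 2 := by omega
              rw [hm, hd1, hd2]
              simp [ilv]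
            · try simp only [List.length_append, List.length_cons, List.length_nil]
              rw [decide_eq_false (by simpa using hb2)]
              simp only [Bool.false_eq_true, if_false, Bool.not_true, Bool.false_and]
              have hcast2 : (n : Int) + 1 = ((n + 1 : Nat) : Int) := by push_cast; ring
              rw [hcast2,
                ih (n + 1) (ret ++ [s1.getD n 0] ++ [s2.getD n 0]) true
                  (by omega) (by simp; omega) (by simp; push_cast at hb2 ⊢; omega)
                  (by intro hc; cases hc)]
              rw [hd1, hd2]
              have hm : (m - (ret.length : Int)).toNat
                  = ((m - ((ret ++ [s1.getD n 0] ++ [s2.getD n 0]).length : Int)).toNat) + 2 := by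
                simp; push_cast at hb2 ⊢; omega
              rw [hm]
              simp [ilv, List.take_succ_cons]
          · -- stamp2 exhausted
            simp only [if_neg h2]
            simp only [Bool.false_eq_true, if_false, Bool.not_true, Bool.false_and]
            have hcast2 : (n : Int) + 1 = ((n + 1 : Nat) : Int) := by push_cast; ring
            rw [hcast2,
              ih (n + 1) (ret ++ [s1.getD n 0]) true
                (by omega) (by simp; omega) (by simp; push_cast at hb1 ⊢; omega)
                (by intro hc; cases hc)]
            have hd2 : s2.drop n = [] := List.drop_eq_nil_of_le (by omega)
            have hd2' : s2.drop (n + 1) = [] := List.drop_eq_nil_of_le (by omega)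
            rw [hd1, hd2, hd2']
            have hm : (m - (ret.length : Int)).toNat
                = ((m - ((ret ++ [s1.getD n 0]).length : Int)).toNat) + 1 := by
              simp; push_cast at hb1 ⊢; omega
            rw [hm]
            cases hdd : s1.drop (n + 1) <;> simp [ilv]
      · -- stamp1 exhausted at index n (p1 becomes/stays false)
        have hs1 : s1.length ≤ n := by omega
        have hst1 : (if p1 then
              if ((n : Int)) < ((s1.length : Int)) then
                ((ret ++ [s1.getD ((n : Int)).toNat 0], p1),
                  decide (m ≤ (((ret ++ [s1.getD ((n : Int)).toNat 0]).length : Nat) : Int)))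
              else ((ret, false), false)
            else ((ret, p1), false)) = ((ret, false), false) := by
          cases p1 <;> simp [h1]
        rw [hst1]
        simp only [Bool.false_eq_true, if_false]
        by_cases h2 : (n : Int) < (s2.length : Int)
        · have hcast : ((n : Int)).toNat = n := by omega
          simp only [if_pos h2, if_true, hcast]
          have hd2 : s2.drop n = s2.getD n 0 :: s2.drop (n + 1) := by
            have hn : n < s2.length := by omega
            rw [List.getD_eq_getElem _ _ hn, List.drop_eq_getElem_cons hn]
          by_cases hb2 : m ≤ ((ret.length + 1 : Nat) : Int)
          · simp only [List.length_append, List.length_cons, List.length_nil]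
            rw [decide_eq_true (by simpa using hb2)]
            simp only [reduceIte]
            have hm : (m - (ret.length : Int)).toNat = 1 := by omega
            rw [hm, ilv_drop_succ s1 s2 n hs1, hd2]
            simp
          · simp only [List.length_append, List.length_cons, List.length_nil]
            rw [decide_eq_false (by simpa using hb2)]
            simp only [Bool.false_eq_true, if_false, Bool.not_false, Bool.true_and, Bool.not_true]
            have hcast2 : (n : Int) + 1 = ((n + 1 : Nat) : Int) := by push_cast; ring
            rw [hcast2,
              ih (n + 1) (ret ++ [s2.getD n 0]) false
                (by omega) (by simp; omega) (by simp; push_cast at hb2 ⊢; omega)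
                (by intro _; omega)]
            rw [ilv_drop_succ s1 s2 n hs1, ilv_drop_succ s1 s2 (n + 1) (by omega), hd2]
            have hm : (m - (ret.length : Int)).toNat
                = ((m - ((ret ++ [s2.getD n 0]).length : Int)).toNat) + 1 := by
              simp; push_cast at hb2 ⊢; omega
            rw [hm]
            simp
        · -- both exhausted: the loop spins on, appending nothing
          have hs2 : s2.length ≤ n := by omega
          simp only [if_neg h2, if_true]
          simp only [Bool.false_eq_true, if_false, Bool.not_false, Bool.true_and, Bool.not_true]
          have hcast2 : (n : Int) + 1 = ((n + 1 : Nat) : Int) := by push_cast; ring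
          rw [hcast2,
            ih (n + 1) ret false (by omega)
              (by omega) hlt (by intro _; omega)]
          rw [ilv_drop_succ s1 s2 n hs1, ilv_drop_succ s1 s2 (n + 1) (by omega),
            List.drop_eq_nil_of_le hs2, List.drop_eq_nil_of_le (le_trans hs2 (by omega))]
    · -- i ≥ m: both drops must be empty (else ret would already hold ≥ n ≥ m elements)
      rename_i hi
      have hn1 : s1.length ≤ n := by omega
      have hn2 : s2.length ≤ n := by omega
      rw [ilv_drop_succ s1 s2 n hn1, List.drop_eq_nil_of_le hn2]
      simp

theorem Stamp_make_spec : Claim_equal_Stamp_make := by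
  intro s1 s2 m _
  unfold Spec_Stamp_make Stamp_make
  show Stamp_make_loop s1 s2 m [] true true 0
      = ((((s1.zip s2).flatMap fun p => [p.1, p.2])
            ++ s1.drop (min s1.length s2.length)
            ++ s2.drop (min s1.length s2.length)).take (max 0 m).toNat)
  rw [alt_full_eq_ilv]
  by_cases hm : m ≤ 0
  · rw [Stamp_make_loop]
    have : ¬ ((0 : Int) < m) := by omega
    rw [dif_neg this]
    have : (max 0 m).toNat = 0 := by omega
    rw [this, List.take_zero]
  · have h0 : ((0 : Nat) : Int) = (0 : Int) := rfl
    rw [← h0, loop_eq s1 s2 m ((m).toNat) 0 [] true (by omega) (by simp) (by simp; omega)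
      (by intro hc; cases hc)]
    simp
    congr 1
    omega
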